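-- pv_equiv track=rewrite | github.com/syntomic/interview | code/least_move.py | solution
-- ===== SOURCE A (Python) =====
-- from functools import lru_cache
--
-- def solution(nums):
--
--     @lru_cache(None)
--     def dp(i, inc=True):
--         if i == 0:
--             return 1
--
--         res = 1
--
--         for j in range(i):
--             if inc:
--                 if nums[j] < nums[i]:
--                     res = max(res, dp(j) + 1)
--             else:
--                 if nums[j] > nums[i]:
--                     res = max(res, dp(j, inc=False) + 1)
--
--         return res
--
--     max_ = max(dp(len(nums)-1), dp(len(nums)-1, inc=False))
--
--     return len(nums) - max_
-- ===== SOURCE B (Python) =====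
-- def solution(nums):
--     # single bottom-up pass: state holds (value, inc_len, dec_len) per index
--     state = []
--     for v in nums:
--         inc = 1 + max((i for (u, i, _) in state if u < v), default=0)
--         dec = 1 + max((d for (u, _, d) in state if u > v), default=0)
--         state.append((v, inc, dec))
--     if not state:
--         return 0
--     _, inc, dec = state[-1]
--     return len(nums) - max(inc, dec)
-- ===== Notes on version B (the rewrite author's own statement) =====
-- stated objective: alternative
-- what changed: Replaces A's two memoized top-down recursions (dp(i,inc) re-scanned per call, with lru_cache and call overhead) by a single bottom-up forward pass that tabulates both the increasing and decreasing run lengths together in one state list, and handles the empty list directly.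
-- intended difference: On the empty list A returns -1 (dp(-1) falls through its empty loop and yields 1), while B returns 0, the intended number of moves for an empty list. — e.g. on solution([]): A returns -1, B returns 0
import Mathlib
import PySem

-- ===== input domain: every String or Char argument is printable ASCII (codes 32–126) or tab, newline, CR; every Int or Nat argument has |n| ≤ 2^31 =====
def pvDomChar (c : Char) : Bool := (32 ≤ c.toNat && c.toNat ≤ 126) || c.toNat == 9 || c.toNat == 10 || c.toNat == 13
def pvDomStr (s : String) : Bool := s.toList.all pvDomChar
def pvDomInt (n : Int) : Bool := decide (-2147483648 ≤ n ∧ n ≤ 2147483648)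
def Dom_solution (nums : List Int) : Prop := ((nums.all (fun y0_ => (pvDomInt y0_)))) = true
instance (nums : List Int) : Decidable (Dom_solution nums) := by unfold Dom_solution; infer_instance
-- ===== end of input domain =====

-- B replaces A's two memoized top-down recursions by ONE bottom-up forward pass that
-- tabulates both the increasing and the decreasing lengths together (objective: alternative);
-- on the empty list B returns the intended 0 where A returns -1 (see D_solution).

-- ===== PORT A =====
-- A's memoized recursion dp(i, inc); memoization does not change the value, so it is ported
-- as the plain recursion.  All indices nums[j], nums[i] are in range in A, so List.getD is exact.
def dpA (nums : List Int) (inc : Bool) : Nat → Int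
  | 0 => 1
  | n+1 =>
    (List.range (n+1)).attach.foldl
      (fun res j =>
        if inc then
          if nums.getD j.1 0 < nums.getD (n+1) 0 then max res (dpA nums true j.1 + 1) else res
        else
          if nums.getD j.1 0 > nums.getD (n+1) 0 then max res (dpA nums false j.1 + 1) else res)
      1
decreasing_by all_goals (have := List.mem_range.mp j.2; omega)

-- Python computes dp(len(nums)-1): for nums = [] that is dp(-1), whose loop is empty and which
-- returns 1 just like dp(0); the Nat index 0-1 = 0 therefore yields the same value (-1 overall).
def solution (nums : List Int) : Int :=
  (nums.length : Int) - max (dpA nums true (nums.length - 1)) (dpA nums false (nums.length - 1))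

-- ===== PORT B =====
def stepB (st : List (Int × Int × Int)) (v : Int) : List (Int × Int × Int) :=
  let inc : Int := 1 + st.foldl (fun m e => if e.1 < v then max m e.2.1 else m) 0
  let dec : Int := 1 + st.foldl (fun m e => if e.1 > v then max m e.2.2 else m) 0
  st ++ [(v, inc, dec)]

def solution_alt (nums : List Int) : Int :=
  let st := nums.foldl stepB []
  match st.getLast? with
  | none => 0
  | some e => (nums.length : Int) - max e.2.1 e.2.2

-- ===== PRECONDITION & SPEC =====
-- On the empty list A returns -1 (an artefact of dp(-1) falling through its empty loop),
-- while B returns the intended answer 0: zero moves are needed for an empty list.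
def D_solution (nums : List Int) : Prop := nums = []
instance (nums : List Int) : Decidable (D_solution nums) := by unfold D_solution; infer_instance

def Spec_solution (nums : List Int) (out : Int) : Prop := ¬ D_solution nums → out = solution_alt nums
instance (nums : List Int) (out : Int) : Decidable (Spec_solution nums out) := by unfold Spec_solution; infer_instance

def pvDiffWitness_solution : List Int := []
def pvDiffWitnessOut_solution : Int × Int := (-1, 0)

-- ===== CLAIM (what is proved, stated in full; the proofs are below) =====
def Claim_unchanged_solution : Prop := ∀ (nums : List Int), Dom_solution nums → Spec_solution nums (solution nums)
def Claim_changed_solution : Prop := Dom_solution (pvDiffWitness_solution) ∧ D_solution (pvDiffWitness_solution) ∧ solution (pvDiffWitness_solution) = pvDiffWitnessOut_solution.1 ∧ solution_alt (pvDiffWitness_solution) = pvDiffWitnessOut_solution.2 ∧ pvDiffWitnessOut_solution.1 ≠ pvDiffWitnessOut_solution.2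
def Claim_exact_solution : Prop := ∀ (nums : List Int), Dom_solution nums → D_solution nums → solution nums ≠ solution_alt nums

-- ===== LEMMAS AND PROOFS =====

-- dpA's inner loop, with the attach used for termination removed (increasing case)
theorem dpA_succ_true (nums : List Int) (n : Nat) :
    dpA nums true (n+1)
      = (List.range (n+1)).foldl
          (fun res j => if nums.getD j 0 < nums.getD (n+1) 0 then max res (dpA nums true j + 1) else res) 1 := by
  rw [dpA]
  exact @List.foldl_attach _ _ (List.range (n+1))
    (fun res j => if nums.getD j 0 < nums.getD (n+1) 0 then max res (dpA nums true j + 1) else res) 1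

-- dpA's inner loop, attach removed (decreasing case)
theorem dpA_succ_false (nums : List Int) (n : Nat) :
    dpA nums false (n+1)
      = (List.range (n+1)).foldl
          (fun res j => if nums.getD j 0 > nums.getD (n+1) 0 then max res (dpA nums false j + 1) else res) 1 := by
  rw [dpA]
  exact @List.foldl_attach _ _ (List.range (n+1))
    (fun res j => if nums.getD j 0 > nums.getD (n+1) 0 then max res (dpA nums false j + 1) else res) 1

-- fold functions agreeing below n agree on range n
theorem foldl_range_congr (f g : Int → Nat → Int) (n : Nat) (init : Int)
    (h : ∀ acc j, j < n → f acc j = g acc j) :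
    (List.range n).foldl f init = (List.range n).foldl g init := by
  induction n generalizing init with
  | zero => rfl
  | succ m ih =>
    simp only [List.range_succ, List.foldl_append, List.foldl_cons, List.foldl_nil]
    rw [ih _ (fun acc j hj => h acc j (by omega)), h _ m (by omega)]

-- A's max-of-(dp+1) fold with init m+1 is 1 plus B's max-of-dp fold with init m
theorem foldl_shift (P : Nat → Prop) [DecidablePred P] (f : Nat → Int) :
    ∀ (l : List Nat) (m : Int),
      l.foldl (fun res j => if P j then max res (f j + 1) else res) (m + 1)
        = l.foldl (fun r j => if P j then max r (f j) else r) m + 1 := by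
  intro l
  induction l with
  | nil => intro m; rfl
  | cons a t ih =>
    intro m
    simp only [List.foldl_cons]
    by_cases hc : P a
    · simp only [hc, if_true]
      rw [show max (m + 1) (f a + 1) = max m (f a) + 1 from max_add_add_right m (f a) 1]
      exact ih _
    · simp only [hc, if_false]
      exact ih m

-- dpA only looks at the first i+1 entries
theorem dpA_prefix (xs : List Int) (x : Int) (b : Bool) :
    ∀ i, i < xs.length → dpA (xs ++ [x]) b i = dpA xs b i := by
  intro i
  induction i using Nat.strong_induction_on with
  | _ i ih =>
    intro hi
    match i with
    | 0 => simp [dpA]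
    | n+1 =>
      cases b
      · rw [dpA_succ_false, dpA_succ_false]
        apply foldl_range_congr
        intro acc j hj
        have hj' : j < xs.length := by omega
        rw [List.getD_append _ _ _ j hj', List.getD_append _ _ _ (n+1) hi, ih j (by omega) hj']
      · rw [dpA_succ_true, dpA_succ_true]
        apply foldl_range_congr
        intro acc j hj
        have hj' : j < xs.length := by omega
        rw [List.getD_append _ _ _ j hj', List.getD_append _ _ _ (n+1) hi, ih j (by omega) hj']

theorem getD_concat_self (xs : List Int) (x : Int) : (xs ++ [x]).getD xs.length 0 = x := by
  rw [List.getD_append_right _ _ _ _ (le_refl xs.length)]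
  simp

-- B's lookup over the tabulated prefix computes A's dp at the next index (increasing case)
theorem tab_lookup_inc (xs : List Int) (x : Int) :
    dpA (xs ++ [x]) true xs.length
      = 1 + ((List.range xs.length).map
              (fun j => (xs.getD j 0, dpA xs true j, dpA xs false j))).foldl
              (fun m e => if e.1 < x then max m e.2.1 else m) 0 := by
  rcases h : xs.length with _ | k
  · simp [dpA]
  · have hxx : (xs ++ [x]).getD (k+1) 0 = x := by rw [← h]; exact getD_concat_self xs x
    rw [dpA_succ_true]
    simp only [hxx]
    calc (List.range (k+1)).foldl
            (fun res j => if (xs ++ [x]).getD j 0 < x then max res (dpA (xs ++ [x]) true j + 1) else res) 1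
        = (List.range (k+1)).foldl
            (fun res j => if xs.getD j 0 < x then max res (dpA xs true j + 1) else res) 1 := by
          apply foldl_range_congr
          intro acc j hj
          have hj' : j < xs.length := by omega
          rw [List.getD_append _ _ _ j hj', dpA_prefix xs x true j hj']
      _ = (List.range (k+1)).foldl
            (fun r j => if xs.getD j 0 < x then max r (dpA xs true j) else r) 0 + 1 := by
          rw [show (1 : Int) = 0 + 1 by ring]
          exact foldl_shift (fun j => xs.getD j 0 < x) (fun j => dpA xs true j) _ 0
      _ = _ := by rw [List.foldl_map, add_comm]

-- same, decreasing case
theorem tab_lookup_dec (xs : List Int) (x : Int) :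
    dpA (xs ++ [x]) false xs.length
      = 1 + ((List.range xs.length).map
              (fun j => (xs.getD j 0, dpA xs true j, dpA xs false j))).foldl
              (fun m e => if e.1 > x then max m e.2.2 else m) 0 := by
  rcases h : xs.length with _ | k
  · simp [dpA]
  · have hxx : (xs ++ [x]).getD (k+1) 0 = x := by rw [← h]; exact getD_concat_self xs x
    rw [dpA_succ_false]
    simp only [hxx]
    calc (List.range (k+1)).foldl
            (fun res j => if (xs ++ [x]).getD j 0 > x then max res (dpA (xs ++ [x]) false j + 1) else res) 1
        = (List.range (k+1)).foldl
            (fun res j => if xs.getD j 0 > x then max res (dpA xs false j + 1) else res) 1 := by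
          apply foldl_range_congr
          intro acc j hj
          have hj' : j < xs.length := by omega
          rw [List.getD_append _ _ _ j hj', dpA_prefix xs x false j hj']
      _ = (List.range (k+1)).foldl
            (fun r j => if xs.getD j 0 > x then max r (dpA xs false j) else r) 0 + 1 := by
          rw [show (1 : Int) = 0 + 1 by ring]
          exact foldl_shift (fun j => xs.getD j 0 > x) (fun j => dpA xs false j) _ 0
      _ = _ := by rw [List.foldl_map, add_comm]

-- the single forward pass tabulates exactly A's dp values at every index
theorem stB_eq (xs : List Int) :
    xs.foldl stepB []
      = (List.range xs.length).map (fun j => (xs.getD j 0, dpA xs true j, dpA xs false j)) := by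
  induction xs using List.reverseRecOn with
  | nil => rfl
  | append_singleton xs x ih =>
    rw [List.foldl_append, List.foldl_cons, List.foldl_nil, ih]
    have hlen : (xs ++ [x]).length = xs.length + 1 := by simp
    rw [hlen, List.range_succ, List.map_append, List.map_cons, List.map_nil]
    simp only [stepB]
    congr 1
    · apply List.map_congr_left
      intro j hj
      have hj' : j < xs.length := List.mem_range.mp hj
      rw [List.getD_append _ _ _ j hj', dpA_prefix xs x true j hj', dpA_prefix xs x false j hj']
    · rw [getD_concat_self, tab_lookup_inc, tab_lookup_dec]

-- ===== VERDICT (by name: the statement is the Claim_ definition above) =====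
theorem solution_spec : Claim_unchanged_solution := by
  intro nums _ hD
  have hne : nums ≠ [] := hD
  obtain ⟨m, hm⟩ : ∃ m, nums.length = m + 1 := by
    cases nums with
    | nil => exact absurd rfl hne
    | cons a t => exact ⟨t.length, by simp⟩
  show solution nums = solution_alt nums
  unfold solution solution_alt
  simp only [stB_eq, hm, List.range_succ, List.map_append, List.map_cons, List.map_nil,
    List.getLast?_concat, Nat.add_sub_cancel]

theorem solution_changed : Claim_changed_solution := by
  unfold Claim_changed_solution
  refine ⟨rfl, rfl, ?_, rfl, by decide⟩
  show (0 : Int) - max (dpA [] true 0) (dpA [] false 0) = -1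
  simp [dpA]

theorem solution_tight : Claim_exact_solution := by
  intro nums _ hD
  subst hD
  show (0 : Int) - max (dpA [] true 0) (dpA [] false 0) ≠ _
  simp [dpA, solution_alt]
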